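-- pv_equiv track=rewrite | github.com/Ferrari25/ParserASDPpy | Automatas.py | automata_si
-- ===== SOURCE A (Python) =====
-- ESTADO_FINAL = "ESTADO FINAL"
--
-- ESTADO_NO_FINAL = "NO ACEPTADO"
--
-- ESTADO_TRAMPA = "EN ESTADO TRAMPA"
--
-- def automata_si(lexema):
--     estadoactual = 0
--     estadosfinales = [2]
--     for vcarac in lexema:
--         if estadoactual == 0 and vcarac == 's':
--            estadoactual = 1
--         elif estadoactual == 1 and vcarac == 'i':
--            estadoactual = 2
--         else:
--            estadoactual = -1
--            break
--     if estadoactual == -1: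
--        return ESTADO_TRAMPA
--     if estadoactual in estadosfinales:
--         return ESTADO_FINAL
--     else:
--         return ESTADO_NO_FINAL
-- ===== SOURCE B (Python) =====
-- ESTADO_FINAL = "ESTADO FINAL"
-- ESTADO_NO_FINAL = "NO ACEPTADO"
-- ESTADO_TRAMPA = "EN ESTADO TRAMPA"
--
-- def automata_si(lexema):
--     chars = list(lexema)
--     if chars == ['s', 'i']:
--         return ESTADO_FINAL
--     if chars == [] or chars == ['s']:
--         return ESTADO_NO_FINAL
--     return ESTADO_TRAMPA
-- ===== Notes on version B (the rewrite author's own statement) =====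
-- stated objective: simpler
-- what changed: Replaced the state-machine transition loop with direct comparison of the character list against the three accepted patterns ('si' -> FINAL, '' or 's' -> NO_FINAL, else TRAMPA); no state variable or loop remains.
import Mathlib
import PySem

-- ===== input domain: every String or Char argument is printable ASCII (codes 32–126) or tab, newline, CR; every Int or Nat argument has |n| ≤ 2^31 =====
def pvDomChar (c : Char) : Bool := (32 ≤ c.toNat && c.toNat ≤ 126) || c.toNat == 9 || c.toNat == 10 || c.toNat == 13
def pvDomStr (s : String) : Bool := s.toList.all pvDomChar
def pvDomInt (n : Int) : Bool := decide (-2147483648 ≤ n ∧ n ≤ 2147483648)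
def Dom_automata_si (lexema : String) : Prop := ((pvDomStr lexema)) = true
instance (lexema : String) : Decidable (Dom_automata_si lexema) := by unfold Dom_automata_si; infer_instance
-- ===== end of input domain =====

-- B compares the character list directly against the three accepted patterns; no state variable or transition loop.

-- ===== PORT A =====
-- the for-loop with break: returns the value of estadoactual after the loop
def automata_si_loop (st : Int) (cs : List Char) : Int :=
  match cs with
  | [] => st
  | c :: rest =>
    if st == 0 && c == 's' then automata_si_loop 1 rest
    else if st == 1 && c == 'i' then automata_si_loop 2 rest
    else -1  -- estadoactual = -1; break

def automata_si (lexema : String) : String :=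
  let estadoactual := automata_si_loop 0 lexema.toList
  let estadosfinales : List Int := [2]
  if estadoactual = -1 then "EN ESTADO TRAMPA"
  else if estadosfinales.contains estadoactual then "ESTADO FINAL"
  else "NO ACEPTADO"

-- ===== PORT B =====
def automata_si_alt (lexema : String) : String :=
  let chars := lexema.toList
  if chars = ['s', 'i'] then "ESTADO FINAL"
  else if chars = [] ∨ chars = ['s'] then "NO ACEPTADO"
  else "EN ESTADO TRAMPA"

-- ===== PRECONDITION & SPEC =====
def Spec_automata_si (lexema : String) (out : String) : Prop := out = automata_si_alt lexema
instance (lexema : String) (out : String) : Decidable (Spec_automata_si lexema out) := by unfold Spec_automata_si; infer_instance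

-- ===== CLAIM (what is proved, stated in full; the proofs are below) =====
def Claim_equal_automata_si : Prop := ∀ (lexema : String), Dom_automata_si lexema → Spec_automata_si lexema (automata_si lexema)

-- ===== LEMMAS AND PROOFS =====
-- case analysis on the character list: at most two transitions before the trap
theorem automata_si_cases (l : List Char) :
    (let st := automata_si_loop 0 l
     if st = -1 then "EN ESTADO TRAMPA"
     else if ([2] : List Int).contains st then "ESTADO FINAL" else "NO ACEPTADO")
    = (if l = ['s', 'i'] then "ESTADO FINAL"
       else if l = [] ∨ l = ['s'] then "NO ACEPTADO"
       else "EN ESTADO TRAMPA") := by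
  match l with
  | [] => simp [automata_si_loop]
  | [c] =>
    by_cases h : c = 's' <;> simp [automata_si_loop, h]
  | c :: d :: rest =>
    by_cases h : c = 's'
    · by_cases h2 : d = 'i'
      · cases rest with
        | nil => simp [automata_si_loop, h, h2]
        | cons e es => simp [automata_si_loop, h, h2]
      · simp [automata_si_loop, h, h2]
    · simp [automata_si_loop, h]

-- ===== VERDICT (by name: the statement is the Claim_ definition above) =====
theorem automata_si_spec : Claim_equal_automata_si := by
  intro lexema _
  unfold Spec_automata_si automata_si automata_si_alt
  exact automata_si_cases lexema.toList
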